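-- pv_equiv track=rewrite | github.com/shahidost/Baseline4VTKEL | source/code/main_VT-LinKEr_System.py | same_visual_mentions_handleing
-- ===== SOURCE A (Python) =====
-- from collections import Counter
--
-- def same_visual_mentions_handleing(visual_entities):
--     """
--     This function assigns names to two or more than two same visual objects detected by YOLO. For example if there are two people in visual objects, this function will differentiable person class between person_1 and person_2 objects.
--     input:
--         visual_entities – Visual objects detected by YOLO
--     Output:
--         visual_entities – Unique objects names
--     """
--     same_visual_entities = Counter(visual_entities)
--     for item in same_visual_entities:
--         if same_visual_entities[item]>1:
--             item_count=same_visual_entities[item]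
--             for i in range(len(visual_entities)):
--                 if item==visual_entities[i] and item_count>1:
--                     visual_entities[i]=item+'_'+str(item_count)
--                     item_count-=1
--
--     return visual_entities
-- ===== SOURCE B (Python) =====
-- def same_visual_mentions_handleing(visual_entities):
--     # Index every label's positions in one pass, then suffix each duplicated
--     # label's occurrences in place (descending numbers, last occurrence kept).
--     positions = {}
--     for i, v in enumerate(visual_entities):
--         if v in positions:
--             positions[v].append(i)
--         else:
--             positions[v] = [i]
--     for label, idxs in positions.items():
--         c = len(idxs)
--         if c > 1:
--             for k, i in enumerate(idxs[:c - 1]):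
--                 visual_entities[i] = label + '_' + str(c - k)
--     return visual_entities
-- ===== Notes on version B (the rewrite author's own statement) =====
-- stated objective: faster
-- what changed: Instead of rescanning the whole list once per distinct label with a countdown counter, B builds a label-to-positions index in one pass and writes the descending suffixes directly at each duplicated label's recorded positions; Pre_ excludes inputs that already contain a label equal to a duplicated label plus one of the numeric suffixes the renaming generates, a collision on which A's in-place rescan may re-rename freshly renamed slots and neither behaviour is specified.
import Mathlib
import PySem

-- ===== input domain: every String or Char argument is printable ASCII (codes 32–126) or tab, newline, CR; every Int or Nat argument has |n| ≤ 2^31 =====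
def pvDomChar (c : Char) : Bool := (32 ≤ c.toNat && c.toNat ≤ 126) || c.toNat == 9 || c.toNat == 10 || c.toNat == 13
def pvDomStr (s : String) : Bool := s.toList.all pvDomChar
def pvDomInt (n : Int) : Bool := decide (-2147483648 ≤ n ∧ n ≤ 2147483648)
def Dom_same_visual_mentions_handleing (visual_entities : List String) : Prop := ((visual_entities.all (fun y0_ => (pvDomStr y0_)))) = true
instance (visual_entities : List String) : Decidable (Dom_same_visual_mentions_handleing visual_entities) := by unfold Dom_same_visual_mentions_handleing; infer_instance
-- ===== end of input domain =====

-- B replaces A's per-label rescans of the whole list by one position index built in a single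
-- pass and writes the suffixes directly at the recorded positions; return value only is
-- compared — both Pythons also mutate the argument list in place in the same way.

-- ===== PORT A =====
def same_visual_mentions_handleing (visual_entities : List String) : List String :=
  let same_visual_entities := PySem.Dict.counter visual_entities
  same_visual_entities.keys.foldl (fun ve item =>
    if same_visual_entities.getD item 0 > 1 then
      let item_count := same_visual_entities.getD item 0
      ((PySem.List.pyRange 0 (ve.length : Int)).foldl
        (fun (st : List String × Int) i =>
          if item = PySem.List.pyGetD st.1 i "" ∧ st.2 > 1 then
            (PySem.List.pySetD st.1 i (item ++ "_" ++ PySem.Int.toStr st.2), st.2 - 1)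
          else st)
        (ve, item_count)).1
    else ve) visual_entities

-- ===== PORT B =====
def same_visual_mentions_handleing_alt (visual_entities : List String) : List String :=
  let positions := (PySem.List.enumerate visual_entities).foldl
      (fun (d : PySem.Dict String (List Int)) p =>
        if d.contains p.2 then d.insert p.2 (d.getD p.2 [] ++ [p.1]) else d.insert p.2 [p.1])
      PySem.Dict.empty
  positions.items.foldl
    (fun (ve : List String) kv =>
      let c : Int := kv.2.length
      if c > 1 then
        (PySem.List.enumerate (PySem.List.slice kv.2 none (some (c - 1)))).foldl
          (fun ve2 ki => PySem.List.pySetD ve2 ki.2 (kv.1 ++ "_" ++ PySem.Int.toStr (c - ki.1))) ve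
      else ve) visual_entities

-- ===== PRECONDITION & SPEC =====
-- Pre_ excludes inputs that already contain a label equal to a duplicated label plus one of
-- the numeric suffixes the renaming generates ('a_2' next to two 'a's): on such collisions
-- A's in-place rescan may re-rename freshly renamed slots, and neither behaviour is specified.
def Pre_same_visual_mentions_handleing (visual_entities : List String) : Prop :=
  ∀ x ∈ visual_entities, 2 ≤ visual_entities.count x →
    ∀ j ∈ List.range' 2 (visual_entities.count x - 1),
      (x ++ "_" ++ PySem.Int.toStr (j : Int)) ∉ visual_entities
instance (visual_entities : List String) : Decidable (Pre_same_visual_mentions_handleing visual_entities) := by unfold Pre_same_visual_mentions_handleing; infer_instance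

def pvWitness_same_visual_mentions_handleing : List String := ["person", "person", "dog"]

def Spec_same_visual_mentions_handleing (visual_entities : List String) (out : List String) : Prop := out = same_visual_mentions_handleing_alt visual_entities
instance (visual_entities : List String) (out : List String) : Decidable (Spec_same_visual_mentions_handleing visual_entities out) := by unfold Spec_same_visual_mentions_handleing; infer_instance

-- ===== CLAIM (what is proved, stated in full; the proofs are below) =====
def Claim_equal_same_visual_mentions_handleing : Prop := ∀ (visual_entities : List String), Dom_same_visual_mentions_handleing visual_entities → Pre_same_visual_mentions_handleing visual_entities → Spec_same_visual_mentions_handleing visual_entities (same_visual_mentions_handleing visual_entities)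

-- ===== LEMMAS AND PROOFS =====
-- pvMs l s y = positions (offset by s) at which y occurs in l
def pvMs (l : List String) (s : Int) (y : String) : List Int :=
  match l with
  | [] => []
  | x :: t => (if x = y then [s] else []) ++ pvMs t (s + 1) y

lemma pvMs_mem (l : List String) (s : Int) (y : String) (i : Int) :
    i ∈ pvMs l s y ↔ ∃ n : Nat, ∃ h : n < l.length, i = s + n ∧ l[n] = y := by
  induction l generalizing s with
  | nil => simp [pvMs]
  | cons x t ih =>
    rw [pvMs]
    constructor
    · intro hmem
      rcases List.mem_append.1 hmem with h1 | h2
      · by_cases hx : x = y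
        · simp [hx] at h1
          exact ⟨0, by simp, by simp [h1, hx]⟩
        · simp [hx] at h1
      · obtain ⟨n, hn, hi, hv⟩ := (ih (s + 1)).1 h2
        exact ⟨n + 1, by simpa using Nat.succ_lt_succ hn, by push_cast; omega, by simpa using hv⟩
    · rintro ⟨n, hn, hi, hv⟩
      match n with
      | 0 => simp_all
      | Nat.succ m =>
        refine List.mem_append.2 (Or.inr ?_)
        refine (ih (s + 1)).2 ⟨m, by simpa using Nat.lt_of_succ_lt_succ hn, by push_cast at hi ⊢; omega, by simpa using hv⟩

lemma pvMs_ge (l : List String) (s : Int) (y : String) : ∀ i ∈ pvMs l s y, s ≤ i := by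
  intro i hi
  obtain ⟨n, hn, hi, _⟩ := (pvMs_mem l s y i).1 hi
  omega

lemma pvMs_pairwise (l : List String) (s : Int) (y : String) :
    (pvMs l s y).Pairwise (· < ·) := by
  induction l generalizing s with
  | nil => simp [pvMs]
  | cons x t ih =>
    rw [pvMs]
    refine List.pairwise_append.2 ⟨?_, ih (s + 1), ?_⟩
    · split <;> simp
    · intro a ha b hb
      have := pvMs_ge t (s + 1) y b hb
      split at ha
      · simp only [List.mem_singleton] at ha
        omega
      · simp at ha

lemma pvMs_length (l : List String) (s : Int) (y : String) :
    (pvMs l s y).length = l.count y := by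
  induction l generalizing s with
  | nil => simp [pvMs]
  | cons x t ih =>
    rw [pvMs, List.count_cons]
    by_cases hx : x = y <;> simp [hx, ih, beq_iff_eq]

lemma pvMs_set_ne (l : List String) (n : Nat) (h : n < l.length) (s : Int) (v y : String)
    (hyv : y ≠ v) (hyo : y ≠ l[n]) : pvMs (l.set n v) s y = pvMs l s y := by
  induction l generalizing n s with
  | nil => simp at h
  | cons x t ih =>
    match n with
    | 0 =>
      simp at hyo
      have hxy : ¬ x = y := fun hh => hyo hh.symm
      simp [pvMs, hxy, Ne.symm hyv]
    | Nat.succ m =>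
      simp only [List.set_cons_succ] at *
      conv_lhs => rw [pvMs]
      conv_rhs => rw [pvMs]
      congr 1
      exact ih m (by simpa using Nat.lt_of_succ_lt_succ h) (s+1) (by simpa using hyo)

def pvStepA (item : String) (st : List String × Int) (i : Int) : List String × Int :=
  if item = PySem.List.pyGetD st.1 i "" ∧ st.2 > 1 then
    (PySem.List.pySetD st.1 i (item ++ "_" ++ PySem.Int.toStr st.2), st.2 - 1)
  else st

def pvAssign (item : String) (c : Int) (l : List String) (ps : List Int) (s : Int) : List String :=
  match ps with
  | [] => l
  | i :: t => pvAssign item c (PySem.List.pySetD l i (item ++ "_" ++ PySem.Int.toStr (c - s))) t (s + 1)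

lemma pvAssign_shift (item : String) (c : Int) (ps : List Int) :
    ∀ (l : List String) (s : Int),
    pvAssign item c l ps (s + 1) = pvAssign item (c - 1) l ps s := by
  induction ps with
  | nil => intro l s; rfl
  | cons i t ih =>
    intro l s
    show pvAssign item c _ t (s + 1 + 1) = pvAssign item (c-1) _ t (s + 1)
    rw [ih]
    congr 2
    ring_nf

lemma pvScanA_spec (item : String) (t : List String) :
    ∀ (l : List String) (a : Nat) (c : Int), l.drop a = t →
    (PySem.List.pyRange (a : Int) (l.length : Int)).foldl (pvStepA item) (l, c) =
      (pvAssign item c l ((pvMs t (a : Int) item).take (c - 1).toNat) 0,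
       c - ((pvMs t (a : Int) item).take (c - 1).toNat).length) := by
  induction t with
  | nil =>
    intro l a c hd
    have hlen : l.length ≤ a := by
      by_contra hlt
      push Not at hlt
      have := List.drop_eq_nil_iff.1 hd
      omega
    rw [PySem.List.pyRange_one_eq_nil (by exact_mod_cast hlen)]
    simp [pvMs, pvAssign]
  | cons x t' ih =>
    intro l a c hd
    have ha : a < l.length := by
      by_contra hge
      push Not at hge
      rw [List.drop_eq_nil_iff.2 hge] at hd
      simp at hd
    have hx : l[a] = x := by
      have h0 : (l.drop a)[0]'(by rw [hd]; simp) = x := by simp [hd]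
      rw [List.getElem_drop] at h0
      simpa using h0
    have hd' : l.drop (a + 1) = t' := by
      have : l.drop (a + 1) = (l.drop a).drop 1 := by rw [List.drop_drop]
      rw [this, hd]
      simp
    rw [PySem.List.pyRange_one_cons (by exact_mod_cast ha)]
    rw [List.foldl_cons]
    have hget : PySem.List.pyGetD l (a : Int) "" = x := by
      rw [PySem.List.pyGetD_eq_getElem l "" (by positivity) (by exact_mod_cast ha)]
      simpa using hx
    have hstep : pvStepA item (l, c) (a : Int) =
        if item = x ∧ c > 1 then (PySem.List.pySetD l (a:Int) (item ++ "_" ++ PySem.Int.toStr c), c - 1) else (l, c) := by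
      simp [pvStepA, hget]
    by_cases hcond : item = x ∧ c > 1
    · obtain ⟨hitem, hc⟩ := hcond
      rw [hstep, if_pos ⟨hitem, hc⟩]
      rw [PySem.List.pySetD_natCast]
      set l' := l.set a (item ++ "_" ++ PySem.Int.toStr c) with hl'
      have hlen' : l'.length = l.length := by simp [hl']
      have hdrop' : l'.drop (a + 1) = t' := by
        rw [hl', List.drop_set]
        simp [hd']
      have hr : PySem.List.pyRange ((a:Int) + 1) (l.length : Int) =
          PySem.List.pyRange (((a+1 : Nat)):Int) ((l'.length) : Int) := by
        rw [hlen']; push_cast; ring_nf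
      rw [hr]
      rw [ih l' (a+1) (c-1) hdrop']
      have hms : pvMs (x :: t') (a : Int) item = (a:Int) :: pvMs t' ((a:Int)+1) item := by
        rw [pvMs, if_pos hitem.symm]
        simp
      have htn : (c - 1).toNat = (c - 1 - 1).toNat + 1 := by omega
      rw [hms, htn, List.take_succ_cons]
      push_cast
      simp only [Prod.mk.injEq]
      refine ⟨?_, ?_⟩
      · conv_rhs => rw [pvAssign]
        have e1 : PySem.List.pySetD l (↑a) (item ++ "_" ++ PySem.Int.toStr (c - 0)) = l' := by
          rw [PySem.List.pySetD_natCast, show c - 0 = c from by ring]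
        rw [e1]
        have e2 := pvAssign_shift item c (List.take (c-1-1).toNat (pvMs t' ((a:Int)+1) item)) l' 0
        rw [← e2]
      · simp only [List.length_cons]
        push_cast
        omega
    · rw [hstep, if_neg hcond]
      by_cases hitem : item = x
      · have hc : ¬ c > 1 := fun hh => hcond ⟨hitem, hh⟩
        have hms : pvMs (x :: t') (a : Int) item = (a:Int) :: pvMs t' ((a:Int)+1) item := by
          rw [pvMs, if_pos hitem.symm]; simp
        have htn : (c - 1).toNat = 0 := by omega
        have hr : PySem.List.pyRange ((a:Int) + 1) (l.length : Int) =
            PySem.List.pyRange (((a+1 : Nat)):Int) ((l.length) : Int) := by push_cast; ring_nf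
        rw [hr, ih l (a+1) c hd']
        rw [hms, htn]
        simp [pvAssign]
      · have hms : pvMs (x :: t') (a : Int) item = pvMs t' ((a:Int)+1) item := by
          rw [pvMs, if_neg (fun hh => hitem hh.symm)]; simp
        have hr : PySem.List.pyRange ((a:Int) + 1) (l.length : Int) =
            PySem.List.pyRange (((a+1 : Nat)):Int) ((l.length) : Int) := by push_cast; ring_nf
        rw [hr, ih l (a+1) c hd', hms]
        push_cast
        rfl

-- B's inner enumerate-fold IS pvAssign
lemma pvInnerB (item : String) (c : Int) (ps : List Int) :
    ∀ (s : Int) (l : List String),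
    (PySem.List.enumerate ps s).foldl
        (fun ve2 ki => PySem.List.pySetD ve2 ki.2 (item ++ "_" ++ PySem.Int.toStr (c - ki.1))) l
      = pvAssign item c l ps s := by
  induction ps with
  | nil => intro s l; simp [PySem.List.enumerate, pvAssign]
  | cons i t ih =>
    intro s l
    rw [PySem.List.enumerate_cons, List.foldl_cons, ih, pvAssign]

-- assigning fresh suffixed names at positions of `item` does not move any other label y
lemma pvAssign_preserve (item y : String) (hy : y ≠ item) (c : Int) (ps : List Int) :
    ∀ (l : List String) (s : Int), ps.Nodup →
    (∀ i ∈ ps, ∃ n : Nat, ∃ h : n < l.length, i = (n : Int) ∧ l[n] = item) →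
    (∀ j : Int, 2 ≤ j → j ≤ c → y ≠ item ++ "_" ++ PySem.Int.toStr j) →
    0 ≤ s → s + ps.length ≤ c - 1 →
    pvMs (pvAssign item c l ps s) 0 y = pvMs l 0 y := by
  induction ps with
  | nil => intro l s _ _ _ _ _; rfl
  | cons i t ih =>
    intro l s hnd hmatch hsuf hs hcb
    obtain ⟨n, hn, hi, hv⟩ := hmatch i List.mem_cons_self
    rw [pvAssign, hi, PySem.List.pySetD_natCast]
    have hlen : s + (i :: t).length ≤ c - 1 := hcb
    have hsufc : y ≠ item ++ "_" ++ PySem.Int.toStr (c - s) := by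
      apply hsuf
      · simp only [List.length_cons] at hlen
        omega
      · omega
    have hset : pvMs (l.set n (item ++ "_" ++ PySem.Int.toStr (c - s))) 0 y = pvMs l 0 y :=
      pvMs_set_ne l n hn 0 _ y hsufc (by rw [hv]; exact hy)
    rw [← hset]
    apply ih _ (s+1) (List.Nodup.of_cons hnd)
    · intro i' hi'
      obtain ⟨n', hn', hi2, hv2⟩ := hmatch i' (List.mem_cons_of_mem i hi')
      have hne : n' ≠ n := by
        intro hh
        have : i' = i := by rw [hi2, hi, hh]
        rw [this] at hi'
        exact (List.nodup_cons.1 hnd).1 hi'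
      exact ⟨n', by simpa using hn', hi2, by rw [List.getElem_set_ne (by omega)]; exact hv2⟩
    · exact hsuf
    · omega
    · simp only [List.length_cons] at hlen
      omega

def pvBuildF : PySem.Dict String (List Int) → Int × String → PySem.Dict String (List Int) :=
  fun d p => if d.contains p.2 then d.insert p.2 (d.getD p.2 [] ++ [p.1]) else d.insert p.2 [p.1]

lemma pvBuildF_eq : pvBuildF = fun d p => d.insert p.2 (d.getD p.2 [] ++ [p.1]) := by
  funext d p
  rw [pvBuildF]
  split
  · rfl
  · rename_i hc
    rw [PySem.Dict.getD_of_not_contains d [] (by simpa using hc)]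
    rfl

lemma pvBuild_getD (l0 : List String) (y : String) :
    ∀ (s : Int) (d : PySem.Dict String (List Int)),
    ((PySem.List.enumerate l0 s).foldl pvBuildF d).getD y [] = d.getD y [] ++ pvMs l0 s y := by
  induction l0 with
  | nil => intro s d; simp [PySem.List.enumerate, pvMs]
  | cons x t ih =>
    intro s d
    rw [PySem.List.enumerate_cons, List.foldl_cons,
      show pvBuildF d (s, x) = d.insert x (d.getD x [] ++ [s]) from by rw [pvBuildF_eq]]
    rw [ih (s+1) (d.insert x (d.getD x [] ++ [s])), pvMs]
    by_cases hxy : x = y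
    · subst hxy
      rw [PySem.Dict.getD_insert_self]
      simp
    · rw [PySem.Dict.getD_insert_of_ne d _ _ (fun hh => hxy hh.symm), if_neg hxy]
      simp

lemma pvBuild_keys (l0 : List String) :
    ((PySem.List.enumerate l0).foldl pvBuildF PySem.Dict.empty).keys = PySem.Set.ofList l0 := by
  rw [pvBuildF_eq, PySem.Dict.keys_foldl_insert_key (PySem.List.enumerate l0) (fun p => p.2)
    (fun d p => d.getD p.2 [] ++ [p.1]) PySem.Dict.empty]
  rw [PySem.List.map_snd_enumerate]
  show PySem.Set.update [] l0 = _
  exact PySem.Set.update_nil_left l0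

-- the two outer folds agree key by key, given the positions of every pending key are unmoved
lemma pvOuter (ve : List String)
    (hpre : ∀ x ∈ ve, 2 ≤ ve.count x →
      ∀ j : Int, 2 ≤ j → j ≤ (ve.count x : Int) → (x ++ "_" ++ PySem.Int.toStr j) ∉ ve)
    (K : List String) :
    ∀ (l : List String), K.Nodup → (∀ y ∈ K, y ∈ ve) →
    (∀ y ∈ K, pvMs l 0 y = pvMs ve 0 y) →
    K.foldl (fun ve' item =>
        if (PySem.Dict.counter ve).getD item 0 > 1 then
          ((PySem.List.pyRange 0 (ve'.length : Int)).foldl (pvStepA item)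
            (ve', (PySem.Dict.counter ve).getD item 0)).1
        else ve') l
      = K.foldl (fun ve' item =>
          if ((pvMs ve 0 item).length : Int) > 1 then
            (PySem.List.enumerate (PySem.List.slice (pvMs ve 0 item) none
                (some (((pvMs ve 0 item).length : Int) - 1)))).foldl
              (fun ve2 ki => PySem.List.pySetD ve2 ki.2
                (item ++ "_" ++ PySem.Int.toStr (((pvMs ve 0 item).length : Int) - ki.1))) ve'
          else ve') l := by
  induction K with
  | nil => intro l _ _ _; rfl
  | cons item K' ih =>
    intro l hnd hKve hms
    rw [List.foldl_cons, List.foldl_cons]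
    have hmem : item ∈ item :: K' := List.mem_cons_self
    have hcnt : (PySem.Dict.counter ve).getD item 0 = ((pvMs ve 0 item).length : Int) := by
      rw [PySem.Dict.getD_counter, pvMs_length]
    set c : Int := ((pvMs ve 0 item).length : Int) with hc
    by_cases hgt : c > 1
    · rw [if_pos (by rw [hcnt]; exact hgt), if_pos hgt]
      rw [hcnt]
      have hA := pvScanA_spec item l l 0 c (by simp)
      rw [Nat.cast_zero] at hA
      rw [hA]
      have hmsi : pvMs l 0 item = pvMs ve 0 item := hms item hmem
      set ps := (pvMs ve 0 item).take (c - 1).toNat with hps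
      have hslice : PySem.List.slice (pvMs ve 0 item) none (some (c - 1)) = ps := by
        rw [PySem.List.slice_to _ (by omega)]
      rw [hslice, pvInnerB, hmsi]
      -- preserve the invariant for the remaining keys
      have hpsnd : ps.Nodup :=
        (List.take_sublist _ _).nodup ((pvMs_pairwise ve 0 item).imp (fun h => ne_of_lt h))
      have hpsm : ∀ i ∈ ps, ∃ n : Nat, ∃ h : n < l.length, i = (n : Int) ∧ l[n] = item := by
        intro i hi
        have : i ∈ pvMs l 0 item := by rw [hmsi]; exact List.mem_of_mem_take hi
        obtain ⟨n, hn, hin, hv⟩ := (pvMs_mem l 0 item i).1 this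
        exact ⟨n, hn, by omega, hv⟩
      have hcount2 : 2 ≤ ve.count item := by
        have := pvMs_length ve 0 item
        omega
      have hpslen : (0 : Int) + (ps.length : Int) ≤ c - 1 := by
        have : ps.length = min (c - 1).toNat (pvMs ve 0 item).length := by
          rw [hps, List.length_take]
        omega
      apply ih (pvAssign item c l ps 0) (List.nodup_cons.1 hnd).2
        (fun y hy => hKve y (List.mem_cons_of_mem _ hy))
      intro y hy
      have hyitem : y ≠ item := fun hh => (List.nodup_cons.1 hnd).1 (hh ▸ hy)
      rw [pvAssign_preserve item y hyitem c ps l 0 hpsnd hpsm ?_ le_rfl hpslen]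
      · exact hms y (List.mem_cons_of_mem _ hy)
      · intro j hj2 hjc hyeq
        have hveC : (ve.count item : Int) = c := by rw [hc, pvMs_length]
        exact hpre item (hKve item hmem) hcount2 j hj2 (by omega)
          (hyeq ▸ hKve y (List.mem_cons_of_mem _ hy))
    · rw [if_neg (by rw [hcnt]; exact hgt), if_neg hgt]
      exact ih l (List.nodup_cons.1 hnd).2 (fun y hy => hKve y (List.mem_cons_of_mem _ hy))
        (fun y hy => hms y (List.mem_cons_of_mem _ hy))

-- ===== VERDICT (by name: the statement is the Claim_ definition above) =====
theorem same_visual_mentions_handleing_spec : Claim_equal_same_visual_mentions_handleing := by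
  intro ve _ hpre
  unfold Spec_same_visual_mentions_handleing
  simp only [same_visual_mentions_handleing, same_visual_mentions_handleing_alt]
  rw [show (fun (d : PySem.Dict String (List Int)) (p : Int × String) =>
      if d.contains p.2 then d.insert p.2 (d.getD p.2 [] ++ [p.1]) else d.insert p.2 [p.1]) = pvBuildF from rfl]
  set pos := (PySem.List.enumerate ve).foldl pvBuildF PySem.Dict.empty with hpos
  have hkeys : pos.keys = PySem.Set.ofList ve := pvBuild_keys ve
  have hknd : pos.keys.Nodup := by rw [hkeys]; exact PySem.Set.nodup_ofList ve
  have hitems : pos.items = pos.keys.map (fun k => (k, pos.getD k [])) :=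
    PySem.Dict.items_eq_map_keys pos hknd []
  have hgd : ∀ k, pos.getD k [] = pvMs ve 0 k := by
    intro k
    rw [hpos]
    simpa using pvBuild_getD ve k 0 PySem.Dict.empty
  have hitems2 : pos.items = pos.keys.map (fun k => (k, pvMs ve 0 k)) := by
    rw [hitems]
    exact List.map_congr_left (fun k _ => by rw [hgd k])
  rw [hitems2, List.foldl_map]
  have hKA : (PySem.Dict.counter ve).keys = pos.keys := by
    rw [PySem.Dict.keys_counter, hkeys]
  rw [hKA]
  have hpre' : ∀ x ∈ ve, 2 ≤ ve.count x →
      ∀ j : Int, 2 ≤ j → j ≤ (ve.count x : Int) → (x ++ "_" ++ PySem.Int.toStr j) ∉ ve := by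
    intro x hx hcx j hj2 hjc
    have hj := hpre x hx hcx j.toNat (by rw [List.mem_range'_1]; omega)
    rwa [show ((j.toNat : Nat) : Int) = j from by omega] at hj
  exact pvOuter ve hpre' pos.keys ve hknd
    (fun y hy => by rw [hkeys] at hy; exact (PySem.Set.mem_ofList ve y).1 hy)
    (fun y _ => rfl)
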